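-- pv_equiv track=rewrite | github.com/alabenkhlifa/automobile-tn-scrapper | automobile-new-crawler.py | _clean_trim_name
-- ===== SOURCE A (Python) =====
-- def _clean_trim_name(trim_name: str) -> str:
--     """Clean up trim name by removing noise prefixes"""
--     if not trim_name:
--         return trim_name
--
--     # Remove common noise prefixes
--     noise_prefixes = ['promo ', 'nouveau ', 'nouvelle ', 'new ', 'offre ']
--     trim_lower = trim_name.lower()
--     for prefix in noise_prefixes:
--         if trim_lower.startswith(prefix):
--             trim_name = trim_name[len(prefix):]
--             break
--
--     return trim_name.strip()
-- ===== SOURCE B (Python) =====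
-- def _clean_trim_name(trim_name: str) -> str:
--     """Clean up trim name by removing noise prefixes"""
--     if not trim_name:
--         return trim_name
--
--     i = trim_name.find(' ')
--     if i != -1 and trim_name[:i].lower() in ('promo', 'nouveau', 'nouvelle', 'new', 'offre'):
--         return trim_name[i + 1:].strip()
--     return trim_name.strip()
-- ===== Notes on version B (the rewrite author's own statement) =====
-- stated objective: alternative
-- what changed: Instead of looping over the five noise prefixes testing startswith on the lowercased string, B locates the first space once with find and checks whether the lowercased first word is in the noise-word set, then slices past it.
import Mathlib
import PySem

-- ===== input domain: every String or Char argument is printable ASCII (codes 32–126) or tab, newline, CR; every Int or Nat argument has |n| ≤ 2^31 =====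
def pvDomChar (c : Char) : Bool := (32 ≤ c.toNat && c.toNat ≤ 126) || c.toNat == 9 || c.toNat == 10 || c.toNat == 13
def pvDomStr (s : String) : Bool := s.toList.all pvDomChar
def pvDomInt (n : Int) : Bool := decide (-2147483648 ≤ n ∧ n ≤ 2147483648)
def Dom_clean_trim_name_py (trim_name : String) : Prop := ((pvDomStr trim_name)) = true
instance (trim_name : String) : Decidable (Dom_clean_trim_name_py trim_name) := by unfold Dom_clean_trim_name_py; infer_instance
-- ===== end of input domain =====

-- B replaces A's five-prefix startswith loop by a single find of the first space plus a
-- membership test of the lowercased first word (objective: alternative decomposition).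

-- ===== PORT A =====
-- the loop 'for prefix in noise_prefixes: if trim_lower.startswith(prefix): trim_name = trim_name[len(prefix):]; break'
def pvCleanLoop : List String → String → String → String
  | [], _, name => name
  | p :: rest, trim_lower, name =>
      if PySem.Str.startswith trim_lower p then
        PySem.Str.slice name (some (PySem.Str.len p)) none
      else pvCleanLoop rest trim_lower name

def clean_trim_name_py (trim_name : String) : String :=
  if trim_name = "" then trim_name
  else
    PySem.Str.strip
      (pvCleanLoop ["promo ", "nouveau ", "nouvelle ", "new ", "offre "]
        (PySem.Str.lower trim_name) trim_name)

-- ===== PORT B =====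
-- Source B binds i = trim_name.find(' ') once; here the same pure expression is written out at its occurrences
def clean_trim_name_py_alt (trim_name : String) : String :=
  if trim_name = "" then trim_name
  else
    if PySem.Str.find trim_name " " ≠ -1 ∧
        (["promo", "nouveau", "nouvelle", "new", "offre"].contains
          (PySem.Str.lower (PySem.Str.slice trim_name none (some (PySem.Str.find trim_name " "))))) = true then
      PySem.Str.strip (PySem.Str.slice trim_name (some (PySem.Str.find trim_name " " + 1)) none)
    else
      PySem.Str.strip trim_name

-- ===== PRECONDITION & SPEC =====
def Spec_clean_trim_name_py (trim_name : String) (out : String) : Prop := out = clean_trim_name_py_alt trim_name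
instance (trim_name : String) (out : String) : Decidable (Spec_clean_trim_name_py trim_name out) := by unfold Spec_clean_trim_name_py; infer_instance

-- ===== CLAIM (what is proved, stated in full; the proofs are below) =====
def Claim_equal_clean_trim_name_py : Prop := ∀ (trim_name : String), Dom_clean_trim_name_py trim_name → Spec_clean_trim_name_py trim_name (clean_trim_name_py trim_name)

-- ===== LEMMAS AND PROOFS =====

lemma pv_singleton_prefix {c : Char} {l : List Char} : [c] <+: l ↔ ∃ r, l = c :: r := by
  constructor
  · rintro ⟨r, rfl⟩; exact ⟨r, rfl⟩
  · rintro ⟨r, rfl⟩; exact ⟨r, rfl⟩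

lemma pv_lowerChar_eq_space {c : Char} (h : PySem.Chars.lowerChar c = ' ') : c = ' ' := by
  unfold PySem.Chars.lowerChar at h
  split at h
  · rename_i hu
    exfalso
    simp only [PySem.Chars.isupper, Bool.and_eq_true, decide_eq_true_eq] at hu
    have h65 : 65 ≤ c.toNat := hu.1
    have h90 : c.toNat ≤ 90 := hu.2
    have hvalid : Nat.isValidChar (c.toNat + 32) := Or.inl (by omega)
    have hval : (Char.ofNat (c.toNat + 32)).toNat = c.toNat + 32 := by
      rw [Char.toNat_ofNat, if_pos hvalid]
    rw [h] at hval
    simp at hval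
    omega
  · exact h

-- the first space of s sits right after w, and the part before it lowercases to w —
-- exactly when the lowercased s starts with "w "
lemma pv_match_iff (w : List Char) (hw : ' ' ∉ w) (s : List Char) :
    (w ++ [' ']) <+: PySem.Chars.lower s ↔
      (PySem.Chars.find s [' '] = (w.length : Int) ∧
        PySem.Chars.lower (s.take w.length) = w) := by
  constructor
  · intro h
    rcases h with ⟨r, hr⟩
    have hr' : PySem.Chars.lower s = w ++ (' ' :: r) := by rw [← hr]; simp
    unfold PySem.Chars.lower at hr'
    rcases List.map_eq_append_iff.mp hr' with ⟨a, b, hs, ha, hb⟩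
    rcases List.map_eq_cons_iff.mp hb with ⟨c, b', hbc, hc, hb'⟩
    have hcsp : c = ' ' := pv_lowerChar_eq_space hc
    subst hcsp
    have hla : a.length = w.length := by rw [← ha, List.length_map]
    have hnosp : ∀ i, i < w.length → ¬ ([' '] : List Char) <+: s.drop i := by
      intro i hi hpre
      rcases pv_singleton_prefix.mp hpre with ⟨r', hr2⟩
      have hia : i < a.length := by omega
      have hget : s.drop i = a[i] :: (a.drop (i+1) ++ b) := by
        subst hs
        rw [List.drop_append_of_le_length (le_of_lt hia), List.drop_eq_getElem_cons hia,
          List.cons_append]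
      have haisp : a[i] = ' ' := (List.cons_eq_cons.mp (hget.symm.trans hr2)).1
      have hmemw : (' ' : Char) ∈ w := by
        rw [← ha]
        exact List.mem_map.mpr ⟨a[i], List.getElem_mem hia, by rw [haisp]; decide⟩
      exact hw hmemw
    have hsp : ([' '] : List Char) <+: s.drop w.length := by
      have hdrop : s.drop w.length = ' ' :: b' := by
        subst hs; subst hbc
        rw [← hla, List.drop_left]
      rw [hdrop]
      exact ⟨b', rfl⟩
    have hmem : (' ' : Char) ∈ s := by subst hs; subst hbc; simp
    have hnn : 0 ≤ PySem.Chars.find s [' '] :=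
      (PySem.Chars.find_nonneg_iff s [' ']).mpr ((List.singleton_infix_iff ' ' s).mpr hmem)
    rcases PySem.Chars.find_spec hnn with ⟨hfw, hfmin⟩
    have hn : (PySem.Chars.find s [' ']).toNat = w.length := by
      by_contra hne
      rcases Nat.lt_or_ge (PySem.Chars.find s [' ']).toNat w.length with hlt | hge
      · exact hnosp _ hlt hfw
      · exact hfmin w.length (by omega) hsp
    refine ⟨by omega, ?_⟩
    have htk : s.take w.length = a := by
      subst hs; rw [← hla, List.take_left]
    rw [htk]
    simpa [PySem.Chars.lower] using ha
  · rintro ⟨hf, htake⟩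
    have hnn : 0 ≤ PySem.Chars.find s [' '] := by omega
    rcases PySem.Chars.find_spec hnn with ⟨hfw, _⟩
    have hnw : (PySem.Chars.find s [' ']).toNat = w.length := by omega
    rw [hnw] at hfw
    rcases pv_singleton_prefix.mp hfw with ⟨r, hr⟩
    have hs : s = s.take w.length ++ (' ' :: r) := by
      rw [← hr, List.take_append_drop]
    refine ⟨r.map PySem.Chars.lowerChar, ?_⟩
    conv_rhs => rw [hs]
    unfold PySem.Chars.lower at htake ⊢
    rw [List.map_append, htake, List.map_cons,
      show PySem.Chars.lowerChar ' ' = ' ' from by decide, List.append_assoc]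
    rfl

lemma pv_find_eq (t : String) : PySem.Str.find t " " = PySem.Chars.find t.toList [' '] := by
  rw [PySem.Str.find_eq, show (" " : String).toList = [' '] from by decide]

lemma pv_x_toList (t : String) (n : Nat) (h : PySem.Str.find t " " = (n : Int)) :
    (PySem.Str.lower (PySem.Str.slice t none (some (PySem.Str.find t " ")))).toList
      = PySem.Chars.lower (t.toList.take n) := by
  rw [PySem.Str.toList_lower, PySem.Str.toList_slice, h, PySem.Chars.slice_eq_listSlice,
    PySem.List.slice_to t.toList (Int.natCast_nonneg n)]
  simp

lemma pv_startswith_iff (t p : String) :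
    PySem.Str.startswith (PySem.Str.lower t) p = true ↔ p.toList <+: PySem.Chars.lower t.toList := by
  rw [PySem.Str.startswith_eq, PySem.Str.toList_lower]
  unfold PySem.Chars.startswith
  exact List.isPrefixOf_iff_prefix

-- from A's matched prefix: the find result and the lowercased first word of B
lemma pv_of_match (t : String) (w : List Char) (hw : ' ' ∉ w)
    (h : (w ++ [' ']) <+: PySem.Chars.lower t.toList) :
    PySem.Str.find t " " = (w.length : Int) ∧
      (PySem.Str.lower (PySem.Str.slice t none (some (PySem.Str.find t " ")))).toList = w := by
  rcases (pv_match_iff w hw t.toList).mp h with ⟨hf, htake⟩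
  have hfind : PySem.Str.find t " " = (w.length : Int) := (pv_find_eq t).trans hf
  exact ⟨hfind, (pv_x_toList t w.length hfind).trans htake⟩

-- from B's matched condition: A's corresponding prefix matches
lemma pv_cond_match (t : String) (w : List Char) (hw : ' ' ∉ w)
    (hne : PySem.Str.find t " " ≠ -1)
    (hxw : (PySem.Str.lower (PySem.Str.slice t none (some (PySem.Str.find t " ")))).toList = w) :
    (w ++ [' ']) <+: PySem.Chars.lower t.toList := by
  have hge : 0 ≤ PySem.Chars.find t.toList [' '] := by
    have h1 := PySem.Chars.neg_one_le_find t.toList [' ']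
    have h2 : PySem.Chars.find t.toList [' '] ≠ -1 := by rw [← pv_find_eq t]; exact hne
    omega
  have hn : PySem.Str.find t " " = ((PySem.Chars.find t.toList [' ']).toNat : Int) := by
    rw [pv_find_eq t]; omega
  have hxl := pv_x_toList t (PySem.Chars.find t.toList [' ']).toNat hn
  have htake : PySem.Chars.lower (t.toList.take (PySem.Chars.find t.toList [' ']).toNat) = w :=
    hxl.symm.trans hxw
  rcases PySem.Chars.find_spec hge with ⟨hfw, _⟩
  rcases pv_singleton_prefix.mp hfw with ⟨r, hr⟩
  have hlen : (PySem.Chars.find t.toList [' ']).toNat < t.toList.length := by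
    have h3 := congrArg List.length hr
    rw [List.length_drop, List.length_cons] at h3
    omega
  have hwn : w.length = (PySem.Chars.find t.toList [' ']).toNat := by
    have h4 := congrArg List.length htake
    simp only [PySem.Chars.lower, List.length_map, List.length_take] at h4
    omega
  apply (pv_match_iff w hw t.toList).mpr
  refine ⟨by rw [← pv_find_eq t, hn]; omega, ?_⟩
  rw [hwn]
  exact htake

theorem pv_main (t : String) (ht : ¬ t = "") :
    clean_trim_name_py t = clean_trim_name_py_alt t := by
  unfold clean_trim_name_py clean_trim_name_py_alt
  rw [if_neg ht, if_neg ht]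
  simp only [pvCleanLoop]
  by_cases h1 : PySem.Str.startswith (PySem.Str.lower t) "promo " = true
  · rw [if_pos h1]
    have hm : (['p','r','o','m','o'] ++ [' ']) <+: PySem.Chars.lower t.toList := by
      have := (pv_startswith_iff t "promo ").mp h1
      simpa [show ("promo " : String).toList = ['p','r','o','m','o'] ++ [' '] from by decide]
        using this
    rcases pv_of_match t ['p','r','o','m','o'] (by decide) hm with ⟨hf, hx⟩
    have hxs : PySem.Str.lower (PySem.Str.slice t none (some (PySem.Str.find t " "))) = "promo" :=
      String.toList_inj.mp (by rw [hx]; decide)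
    rw [if_pos ⟨by rw [hf]; decide, by rw [hxs]; decide⟩]
    rw [hf, show PySem.Str.len "promo " = 6 from by decide]
    norm_num
  · rw [if_neg h1]
    by_cases h2 : PySem.Str.startswith (PySem.Str.lower t) "nouveau " = true
    · rw [if_pos h2]
      have hm : (['n','o','u','v','e','a','u'] ++ [' ']) <+: PySem.Chars.lower t.toList := by
        have := (pv_startswith_iff t "nouveau ").mp h2
        simpa [show ("nouveau " : String).toList = ['n','o','u','v','e','a','u'] ++ [' '] from by decide]
          using this
      rcases pv_of_match t ['n','o','u','v','e','a','u'] (by decide) hm with ⟨hf, hx⟩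
      have hxs : PySem.Str.lower (PySem.Str.slice t none (some (PySem.Str.find t " "))) = "nouveau" :=
        String.toList_inj.mp (by rw [hx]; decide)
      rw [if_pos ⟨by rw [hf]; decide, by rw [hxs]; decide⟩]
      rw [hf, show PySem.Str.len "nouveau " = 8 from by decide]
      norm_num
    · rw [if_neg h2]
      by_cases h3 : PySem.Str.startswith (PySem.Str.lower t) "nouvelle " = true
      · rw [if_pos h3]
        have hm : (['n','o','u','v','e','l','l','e'] ++ [' ']) <+: PySem.Chars.lower t.toList := by
          have := (pv_startswith_iff t "nouvelle ").mp h3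
          simpa [show ("nouvelle " : String).toList = ['n','o','u','v','e','l','l','e'] ++ [' '] from by decide]
            using this
        rcases pv_of_match t ['n','o','u','v','e','l','l','e'] (by decide) hm with ⟨hf, hx⟩
        have hxs : PySem.Str.lower (PySem.Str.slice t none (some (PySem.Str.find t " "))) = "nouvelle" :=
          String.toList_inj.mp (by rw [hx]; decide)
        rw [if_pos ⟨by rw [hf]; decide, by rw [hxs]; decide⟩]
        rw [hf, show PySem.Str.len "nouvelle " = 9 from by decide]
        norm_num
      · rw [if_neg h3]
        by_cases h4 : PySem.Str.startswith (PySem.Str.lower t) "new " = true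
        · rw [if_pos h4]
          have hm : (['n','e','w'] ++ [' ']) <+: PySem.Chars.lower t.toList := by
            have := (pv_startswith_iff t "new ").mp h4
            simpa [show ("new " : String).toList = ['n','e','w'] ++ [' '] from by decide]
              using this
          rcases pv_of_match t ['n','e','w'] (by decide) hm with ⟨hf, hx⟩
          have hxs : PySem.Str.lower (PySem.Str.slice t none (some (PySem.Str.find t " "))) = "new" :=
            String.toList_inj.mp (by rw [hx]; decide)
          rw [if_pos ⟨by rw [hf]; decide, by rw [hxs]; decide⟩]
          rw [hf, show PySem.Str.len "new " = 4 from by decide]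
          norm_num
        · rw [if_neg h4]
          by_cases h5 : PySem.Str.startswith (PySem.Str.lower t) "offre " = true
          · rw [if_pos h5]
            have hm : (['o','f','f','r','e'] ++ [' ']) <+: PySem.Chars.lower t.toList := by
              have := (pv_startswith_iff t "offre ").mp h5
              simpa [show ("offre " : String).toList = ['o','f','f','r','e'] ++ [' '] from by decide]
                using this
            rcases pv_of_match t ['o','f','f','r','e'] (by decide) hm with ⟨hf, hx⟩
            have hxs : PySem.Str.lower (PySem.Str.slice t none (some (PySem.Str.find t " "))) = "offre" :=
              String.toList_inj.mp (by rw [hx]; decide)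
            rw [if_pos ⟨by rw [hf]; decide, by rw [hxs]; decide⟩]
            rw [hf, show PySem.Str.len "offre " = 6 from by decide]
            norm_num
          · rw [if_neg h5]
            rw [if_neg ?hc]
            case hc =>
              rintro ⟨hne, hcont⟩
              simp only [List.contains_cons, List.contains_nil, Bool.or_eq_true, beq_iff_eq,
                Bool.or_false] at hcont
              rcases hcont with hxe | hxe | hxe | hxe | hxe
              · exact h1 ((pv_startswith_iff t "promo ").mpr (by
                  rw [show ("promo " : String).toList = ['p','r','o','m','o'] ++ [' '] from by decide]
                  exact pv_cond_match t ['p','r','o','m','o'] (by decide) hne (by rw [hxe]; decide)))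
              · exact h2 ((pv_startswith_iff t "nouveau ").mpr (by
                  rw [show ("nouveau " : String).toList = ['n','o','u','v','e','a','u'] ++ [' '] from by decide]
                  exact pv_cond_match t ['n','o','u','v','e','a','u'] (by decide) hne (by rw [hxe]; decide)))
              · exact h3 ((pv_startswith_iff t "nouvelle ").mpr (by
                  rw [show ("nouvelle " : String).toList = ['n','o','u','v','e','l','l','e'] ++ [' '] from by decide]
                  exact pv_cond_match t ['n','o','u','v','e','l','l','e'] (by decide) hne (by rw [hxe]; decide)))
              · exact h4 ((pv_startswith_iff t "new ").mpr (by
                  rw [show ("new " : String).toList = ['n','e','w'] ++ [' '] from by decide]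
                  exact pv_cond_match t ['n','e','w'] (by decide) hne (by rw [hxe]; decide)))
              · exact h5 ((pv_startswith_iff t "offre ").mpr (by
                  rw [show ("offre " : String).toList = ['o','f','f','r','e'] ++ [' '] from by decide]
                  exact pv_cond_match t ['o','f','f','r','e'] (by decide) hne (by rw [hxe]; decide)))

-- ===== VERDICT (by name: the statement is the Claim_ definition above) =====
set_option maxHeartbeats 1000000 in
theorem clean_trim_name_py_spec : Claim_equal_clean_trim_name_py := by
  intro t _
  unfold Spec_clean_trim_name_py
  by_cases ht : t = ""
  · subst ht
    unfold clean_trim_name_py clean_trim_name_py_alt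
    rw [if_pos rfl, if_pos rfl]
  · exact pv_main t ht
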